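-- pv_equiv track=rewrite | github.com/wallix/redemption | tools/kbd_blocker/gen_keylayout.py | insert_sublist_and_return_index
-- ===== SOURCE A (Python) =====
-- def insert_sublist_and_return_index(l, subl):
--     sublen = len(subl)
--     llen = len(l)
--     if sublen <= llen:
--         # search sublist
--         for i in range(llen - sublen + 1):
--             if l[i:i+sublen] == subl:
--                 return i
--
--     i = 0
--     # search overlap
--     for i in range(llen):
--         if l[llen-i-1:] != subl[:i]:
--             break
--     l += subl[i:]
--     return llen-i
-- ===== SOURCE B (Python) =====
-- def insert_sublist_and_return_index(l, subl):
--     # Rabin-Karp: rolling-hash scan (alternative algorithm) for the first occurrence of subl in l;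
--     # if absent, append subl and return the old length (exactly A's behaviour,
--     # since A's "overlap" loop always breaks at i == 0).
--     m = len(subl)
--     n = len(l)
--     if m <= n:
--         P = (1 << 61) - 1
--         B = 1000003
--         th = 0
--         for x in subl:
--             th = (th * B + x) % P
--         h = 0
--         for x in l[:m]:
--             h = (h * B + x) % P
--         pw = pow(B, m - 1, P) if m else 1
--         for i in range(n - m + 1):
--             if h == th and l[i:i + m] == subl:
--                 return i
--             if i + m < n:
--                 h = ((h - l[i] * pw) * B + l[i + m]) % P
--     l += subl
--     return n
-- ===== Notes on version B (the rewrite author's own statement) =====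
-- stated objective: alternative
-- what changed: A compares the slice l[i:i+m] with subl at every position; B is a Rabin-Karp search that maintains a rolling hash of the current window and does the full slice comparison only on a hash hit, appending subl and returning len(l) when there is no occurrence exactly as A does (A's 'overlap' loop always breaks at i == 0, so A too appends the whole subl).
import Mathlib
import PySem

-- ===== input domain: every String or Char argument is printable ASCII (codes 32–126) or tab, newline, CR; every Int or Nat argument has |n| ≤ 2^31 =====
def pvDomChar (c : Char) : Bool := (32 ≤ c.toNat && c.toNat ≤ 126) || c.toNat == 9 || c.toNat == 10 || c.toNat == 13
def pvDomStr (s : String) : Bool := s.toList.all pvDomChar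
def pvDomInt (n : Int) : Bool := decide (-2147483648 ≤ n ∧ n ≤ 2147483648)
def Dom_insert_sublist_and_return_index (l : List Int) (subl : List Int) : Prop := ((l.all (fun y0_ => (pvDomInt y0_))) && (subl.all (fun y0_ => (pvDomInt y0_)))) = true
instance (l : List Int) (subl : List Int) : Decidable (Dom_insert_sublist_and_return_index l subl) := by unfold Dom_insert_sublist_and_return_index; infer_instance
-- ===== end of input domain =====

-- B replaces A's per-position slice-comparison scan by a Rabin-Karp rolling-hash scan (objective:
-- alternative algorithm; not measured faster). Both A and B mutate l in place (append) when subl does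
-- not occur in l, and the appended elements are the same (A's overlap loop always breaks at i = 0);
-- the theorems below are about the return value.

-- ===== PORT A =====
-- the 'for i in range(llen - sublen + 1): if l[i:i+sublen] == subl: return i' loop
def pvASearch (l subl : List Int) (sublen : Int) : List Int → Option Int
  | [] => none
  | i :: rest =>
    if PySem.List.slice l (some i) (some (i + sublen)) = subl then some i
    else pvASearch l subl sublen rest

-- the 'for i in range(llen): if l[llen-i-1:] != subl[:i]: break' loop; returns the final value of i
def pvAOverlap (l subl : List Int) (llen : Int) : List Int → Int → Int
  | [], cur => cur
  | i :: rest, _ =>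
    if PySem.List.slice l (some (llen - i - 1)) none ≠ PySem.List.slice subl none (some i) then i
    else pvAOverlap l subl llen rest i

def insert_sublist_and_return_index (l : List Int) (subl : List Int) : Int :=
  let sublen : Int := subl.length
  let llen : Int := l.length
  match (if sublen ≤ llen then
           pvASearch l subl sublen (PySem.List.pyRange 0 (llen - sublen + 1) 1)
         else none) with
  | some i => i
  | none => llen - pvAOverlap l subl llen (PySem.List.pyRange 0 llen 1) 0
    -- 'l += subl[i:]' only mutates l; the returned value is llen - i

-- ===== PORT B =====
def pvP : Int := 2305843009213693951   -- (1 << 61) - 1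
def pvB : Int := 1000003

-- one step of 'h = (h * B + x) % P'
def pvHstep (h x : Int) : Int := PySem.Int.mod (h * pvB + x) pvP

-- the scan 'for i in range(n - m + 1): ... h = ((h - l[i] * pw) * B + l[i + m]) % P'
def pvRkScan (l subl : List Int) (m n th pw : Int) : List Int → Int → Option Int
  | [], _ => none
  | i :: rest, h =>
    if h = th ∧ PySem.List.slice l (some i) (some (i + m)) = subl then some i
    else
      pvRkScan l subl m n th pw rest
        (if i + m < n then
           PySem.Int.mod ((h - PySem.List.pyGetD l i 0 * pw) * pvB + PySem.List.pyGetD l (i + m) 0) pvP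
         else h)

def insert_sublist_and_return_index_alt (l : List Int) (subl : List Int) : Int :=
  let m : Int := subl.length
  let n : Int := l.length
  match (if m ≤ n then
           pvRkScan l subl m n
             (subl.foldl pvHstep 0)
             (if m = 0 then 1 else PySem.Int.powMod pvB (m - 1).toNat pvP)
             (PySem.List.pyRange 0 (n - m + 1) 1)
             ((PySem.List.slice l none (some m)).foldl pvHstep 0)
         else none) with
  | some i => i
  | none => n
    -- 'l += subl' only mutates l; the returned value is n

-- ===== PRECONDITION & SPEC =====
def Spec_insert_sublist_and_return_index (l : List Int) (subl : List Int) (out : Int) : Prop := out = insert_sublist_and_return_index_alt l subl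
instance (l : List Int) (subl : List Int) (out : Int) : Decidable (Spec_insert_sublist_and_return_index l subl out) := by unfold Spec_insert_sublist_and_return_index; infer_instance

-- ===== CLAIM (what is proved, stated in full; the proofs are below) =====
def Claim_equal_insert_sublist_and_return_index : Prop := ∀ (l : List Int) (subl : List Int), Dom_insert_sublist_and_return_index l subl → Spec_insert_sublist_and_return_index l subl (insert_sublist_and_return_index l subl)

-- ===== LEMMAS AND PROOFS =====

-- the raw (un-reduced) Horner polynomial of a list
def pvRaw (xs : List Int) (a : Int) : Int := xs.foldl (fun h x => h * pvB + x) a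

lemma pvP_pos : (0 : Int) < pvP := by unfold pvP; norm_num

-- the mod-reduced fold equals the raw fold reduced once
lemma pvHash_eq_raw_mod : ∀ (xs : List Int) (a : Int), xs.foldl pvHstep (a % pvP) = pvRaw xs a % pvP := by
  intro xs
  induction xs with
  | nil => intro a; simp [pvRaw]
  | cons x xs ih =>
    intro a
    have h1 : pvHstep (a % pvP) x = (a * pvB + x) % pvP := by
      rw [pvHstep, PySem.Int.mod_eq_emod_of_pos pvP_pos]
      exact ((Int.mod_modEq a pvP).mul_right pvB).add_right x
    show List.foldl pvHstep (pvHstep (a % pvP) x) xs = _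
    rw [h1, ih (a * pvB + x)]
    rfl

lemma pvHash_eq_raw_mod0 (xs : List Int) : xs.foldl pvHstep 0 = pvRaw xs 0 % pvP := by
  have h := pvHash_eq_raw_mod xs 0
  rwa [Int.zero_emod] at h

-- raw fold with accumulator
lemma pvRaw_acc : ∀ (xs : List Int) (a : Int), pvRaw xs a = a * pvB ^ xs.length + pvRaw xs 0 := by
  intro xs
  induction xs with
  | nil => intro a; simp [pvRaw]
  | cons x xs ih =>
    intro a
    show pvRaw xs (a * pvB + x) = a * pvB ^ (xs.length + 1) + pvRaw xs (0 * pvB + x)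
    rw [ih (a * pvB + x), ih (0 * pvB + x)]
    ring

lemma pvRaw_append_singleton (xs : List Int) (y : Int) : pvRaw (xs ++ [y]) 0 = pvRaw xs 0 * pvB + y := by
  simp [pvRaw, List.foldl_append]

-- the window slice, as drop/take with Nat indices
lemma pvSlice_window (l : List Int) (i m : Int) (hi : 0 ≤ i) (hm : 0 ≤ m) :
    PySem.List.slice l (some i) (some (i + m)) = (l.drop i.toNat).take m.toNat := by
  rw [PySem.List.slice_toNat l hi (by omega)]
  congr 1
  omega

-- empty-pattern slice
lemma pvSlice_empty (l : List Int) (i : Int) (hi : 0 ≤ i) :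
    PySem.List.slice l (some i) (some (i + 0)) = [] := by
  rw [pvSlice_window l i 0 hi le_rfl]
  simp

-- the rolling-hash update is correct
lemma pvRoll (l : List Int) (i m : Int) (hi : 0 ≤ i) (hm : 0 < m) (hin : i + m < l.length) :
    PySem.Int.mod
      (((PySem.List.slice l (some i) (some (i + m))).foldl pvHstep 0
          - PySem.List.pyGetD l i 0 * PySem.Int.powMod pvB (m - 1).toNat pvP) * pvB
        + PySem.List.pyGetD l (i + m) 0) pvP
    = (PySem.List.slice l (some (i + 1)) (some (i + 1 + m))).foldl pvHstep 0 := by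
  set j := i.toNat with hj
  obtain ⟨ν, hν⟩ : ∃ ν, m.toNat = ν + 1 := ⟨m.toNat - 1, by omega⟩
  have hlen : j + (ν + 1) < l.length := by omega
  have hj1 : j < l.length := by omega
  have ha : PySem.List.pyGetD l i 0 = l[j] :=
    PySem.List.pyGetD_eq_getElem l 0 hi (by omega)
  have hy : PySem.List.pyGetD l (i + m) 0 = l[j + (ν + 1)] := by
    rw [PySem.List.pyGetD_eq_getElem l 0 (by omega) (by omega)]
    simp only [show (i + m).toNat = j + (ν + 1) from by omega]
  have hw : PySem.List.slice l (some i) (some (i + m))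
      = l[j] :: (l.drop (j + 1)).take ν := by
    rw [pvSlice_window l i m hi hm.le, hν, List.drop_eq_getElem_cons hj1, List.take_succ_cons]
  have hw' : PySem.List.slice l (some (i + 1)) (some (i + 1 + m))
      = (l.drop (j + 1)).take ν ++ [l[j + (ν + 1)]] := by
    rw [pvSlice_window l (i + 1) m (by omega) hm.le,
        show (i + 1).toNat = j + 1 from by omega, hν, List.take_add_one, List.getElem?_drop,
        List.getElem?_eq_getElem (by omega : j + 1 + ν < l.length)]
    simp only [show j + 1 + ν = j + (ν + 1) from by omega]
    rfl
  have hlentake : ((l.drop (j + 1)).take ν).length = ν := by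
    rw [List.length_take, List.length_drop]
    omega
  set t := (l.drop (j + 1)).take ν with ht
  rw [hw, hw', ha, hy, pvHash_eq_raw_mod0, pvHash_eq_raw_mod0, pvRaw_append_singleton,
      PySem.Int.mod_eq_emod_of_pos pvP_pos, PySem.Int.powMod_eq_emod _ _ pvP_pos,
      show (m - 1).toNat = ν from by omega]
  have hraw : pvRaw (l[j] :: t) 0 = l[j] * pvB ^ ν + pvRaw t 0 := by
    show pvRaw t (0 * pvB + l[j]) = _
    rw [pvRaw_acc t (0 * pvB + l[j]), hlentake]
    ring
  rw [hraw]
  have e1 : (l[j] * pvB ^ ν + pvRaw t 0) % pvP ≡ l[j] * pvB ^ ν + pvRaw t 0 [ZMOD pvP] :=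
    Int.mod_modEq _ pvP
  have e2 : l[j] * (pvB ^ ν % pvP) ≡ l[j] * pvB ^ ν [ZMOD pvP] :=
    (Int.mod_modEq _ pvP).mul_left l[j]
  calc (((l[j] * pvB ^ ν + pvRaw t 0) % pvP - l[j] * (pvB ^ ν % pvP)) * pvB + l[j + (ν + 1)]) % pvP
      = ((l[j] * pvB ^ ν + pvRaw t 0 - l[j] * pvB ^ ν) * pvB + l[j + (ν + 1)]) % pvP :=
        ((e1.sub e2).mul_right pvB).add_right _
    _ = (pvRaw t 0 * pvB + l[j + (ν + 1)]) % pvP := by ring_nf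

-- the two scans agree, given the rolling-hash invariant
lemma pvScan_eq (l subl : List Int) (m n : Int)
    (hm : m = subl.length) (hn : n = l.length) :
    ∀ (k : Nat) (i h : Int), 0 ≤ i → (n - m + 1 - i).toNat = k →
      h = (PySem.List.slice l (some i) (some (i + m))).foldl pvHstep 0 →
      pvRkScan l subl m n (subl.foldl pvHstep 0)
          (if m = 0 then 1 else PySem.Int.powMod pvB (m - 1).toNat pvP)
          (PySem.List.pyRange i (n - m + 1) 1) h
        = pvASearch l subl m (PySem.List.pyRange i (n - m + 1) 1) := by
  intro k
  induction k with
  | zero =>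
    intro i h hi hk _
    rw [PySem.List.pyRange_one_eq_nil (by omega)]
    rfl
  | succ k ih =>
    intro i h hi hk hinv
    have hlt : i < n - m + 1 := by omega
    rw [PySem.List.pyRange_one_cons hlt]
    simp only [pvRkScan, pvASearch]
    by_cases hsl : PySem.List.slice l (some i) (some (i + m)) = subl
    · have hh : h = subl.foldl pvHstep 0 := by rw [hinv, hsl]
      rw [if_pos ⟨hh, hsl⟩, if_pos hsl]
    · have hm0 : m ≠ 0 := by
        intro h0
        apply hsl
        rw [h0, pvSlice_empty l i hi]
        have hsl0 : subl.length = 0 := by omega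
        exact (List.eq_nil_of_length_eq_zero hsl0).symm
      rw [if_neg (fun hc => hsl hc.2), if_neg hsl]
      by_cases hend : i + m < n
      · rw [if_pos hend]
        refine ih (i + 1) _ (by omega) (by omega) ?_
        rw [if_neg hm0, hinv]
        exact pvRoll l i m hi (by omega) (by omega)
      · have hnil : PySem.List.pyRange (i + 1) (n - m + 1) 1 = [] :=
          PySem.List.pyRange_one_eq_nil (by omega)
        rw [hnil]
        rfl

-- A's overlap loop always breaks at its first iteration: l[llen-1:] is nonempty whenever l is
lemma pvOverlap_zero (l subl : List Int) :
    pvAOverlap l subl l.length (PySem.List.pyRange 0 l.length 1) 0 = 0 := by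
  cases l with
  | nil =>
    rw [PySem.List.pyRange_one_eq_nil (by simp)]
    rfl
  | cons x xs =>
    have hidx : ((x :: xs).length : Int) - 0 - 1 = (xs.length : Int) := by
      simp only [List.length_cons]
      push_cast
      ring
    have hpos : (0 : Int) < ((x :: xs).length : Int) := by
      simp only [List.length_cons]
      push_cast
      omega
    rw [PySem.List.pyRange_one_cons hpos]
    simp only [pvAOverlap]
    rw [if_pos]
    intro hcontra
    rw [hidx, PySem.List.slice_from (x :: xs) (Int.natCast_nonneg xs.length),
        PySem.List.slice_to subl (le_refl (0 : Int))] at hcontra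
    simp only [Int.toNat_natCast, Int.toNat_zero, List.take_zero, List.drop_eq_nil_iff,
      List.length_cons] at hcontra
    omega

-- the searches of A and B coincide
lemma pvFound_eq (l subl : List Int) :
    (if (subl.length : Int) ≤ (l.length : Int) then
       pvRkScan l subl subl.length l.length
         (subl.foldl pvHstep 0)
         (if (subl.length : Int) = 0 then 1 else PySem.Int.powMod pvB (((subl.length : Int) - 1)).toNat pvP)
         (PySem.List.pyRange 0 ((l.length : Int) - (subl.length : Int) + 1) 1)
         ((PySem.List.slice l none (some (subl.length : Int))).foldl pvHstep 0)
     else none)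
    = (if (subl.length : Int) ≤ (l.length : Int) then
         pvASearch l subl subl.length (PySem.List.pyRange 0 ((l.length : Int) - (subl.length : Int) + 1) 1)
       else none) := by
  by_cases hmn : (subl.length : Int) ≤ (l.length : Int)
  · rw [if_pos hmn, if_pos hmn]
    refine pvScan_eq l subl subl.length l.length rfl rfl
      (((l.length : Int) - (subl.length : Int) + 1 - 0).toNat) 0 _ le_rfl rfl ?_
    rw [PySem.List.slice_zero_start, zero_add]
  · rw [if_neg hmn, if_neg hmn]

-- ===== VERDICT (by name: the statement is the Claim_ definition above) =====
theorem insert_sublist_and_return_index_spec : Claim_equal_insert_sublist_and_return_index := by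
  intro l subl _
  show insert_sublist_and_return_index l subl = insert_sublist_and_return_index_alt l subl
  simp only [insert_sublist_and_return_index, insert_sublist_and_return_index_alt]
  rw [pvFound_eq l subl]
  cases hfound : (if (subl.length : Int) ≤ (l.length : Int) then
      pvASearch l subl subl.length (PySem.List.pyRange 0 ((l.length : Int) - (subl.length : Int) + 1) 1)
    else none) with
  | some i => rfl
  | none =>
    show ((l.length : Int)) - pvAOverlap l subl l.length (PySem.List.pyRange 0 l.length 1) 0 = ((l.length : Int))
    rw [pvOverlap_zero]
    omega
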